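-- pv_equiv track=rewrite | github.com/croaxx/ProjectEuler | Yandex/alarms/alarms.py | compute_wake_time
-- ===== SOURCE A (Python) =====
-- import heapq
--
-- def compute_wake_time(X: int, K: int, start_times: list) -> int:
--     time_max = max(start_times)
--     rings_before_tmax = sum([(time_max - t) // X + 1 for t in start_times])
--     rings_remain = K
--     wake_time = 0
--     heap = []
--     if rings_before_tmax > K:
--         heap = list(start_times)
--     else:
--         rings_in_period = len(start_times)
--         num_periods = (K - rings_before_tmax) // rings_in_period
--         rings_remain = K - rings_before_tmax - rings_in_period * num_periods
--         wake_time = time_max + X * num_periods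
--         heap = [
--             X * num_periods + t + X * ((time_max + X - t) // X)
--             for t in start_times
--         ]
--     heapq.heapify(heap)
--     while rings_remain > 0:
--         wake_time = heap[0]
--         heapq.heappop(heap)
--         heapq.heappush(heap, wake_time + X)
--         rings_remain -= 1
--     return wake_time
-- ===== SOURCE B (Python) =====
-- def compute_wake_time(X: int, K: int, start_times: list) -> int:
--     time_max = max(start_times)
--     if K <= 0:
--         return 0
--     def count(T):
--         return sum((T - t) // X + 1 for t in start_times if T >= t)
--     lo, hi = min(start_times), time_max + X * K
--     while lo < hi:
--         mid = (lo + hi) // 2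
--         if count(mid) >= K:
--             hi = mid
--         else:
--             lo = mid + 1
--     return lo
-- ===== Notes on version B (the rewrite author's own statement) =====
-- stated objective: alternative
-- what changed: Replaces the period fast-forward plus heap simulation of individual rings with a binary search for the smallest time T at which the closed-form ring count sum((T-t)//X+1 for t<=T) reaches K.
-- outside the precondition, e.g. on compute_wake_time(-1, -8, [0, 10]): A returns 10, B returns 0; on compute_wake_time(-1, 2, [0]): A returns -1, B returns 0
import Mathlib
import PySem

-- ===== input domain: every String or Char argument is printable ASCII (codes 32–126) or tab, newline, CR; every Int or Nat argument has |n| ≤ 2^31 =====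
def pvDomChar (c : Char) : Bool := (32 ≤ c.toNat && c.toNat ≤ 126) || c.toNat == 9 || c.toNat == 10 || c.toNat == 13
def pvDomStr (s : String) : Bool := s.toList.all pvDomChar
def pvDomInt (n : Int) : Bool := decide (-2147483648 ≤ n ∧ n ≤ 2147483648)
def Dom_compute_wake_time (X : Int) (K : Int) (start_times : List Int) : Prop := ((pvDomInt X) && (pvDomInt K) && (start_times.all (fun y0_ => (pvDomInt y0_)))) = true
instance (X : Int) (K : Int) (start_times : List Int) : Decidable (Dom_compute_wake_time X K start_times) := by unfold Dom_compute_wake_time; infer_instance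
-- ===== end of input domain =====

-- B replaces A's period fast-forward + heap simulation by a binary search on the answer
-- time over the closed-form ring count (alternative algorithm, similar cost).


-- ===== PORT A =====
-- heapq over Int: only the multiset content of the heap is observable, so
-- heapify keeps the list, heap[0] is the minimum, heappop removes one minimal
-- element, heappush appends; the 'while rings_remain > 0' loop runs
-- rings_remain.toNat times.
def pvLoopA (X : Int) : Nat → Int → List Int → Int
  | 0, wake_time, _ => wake_time
  | n + 1, _, heap =>
      let wake_time := (PySem.List.min? heap (fun y => y)).getD 0
      pvLoopA X n wake_time (heap.erase wake_time ++ [wake_time + X])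

def compute_wake_time (X : Int) (K : Int) (start_times : List Int) : Int :=
  let time_max := (PySem.List.max? start_times (fun y => y)).getD 0
  let rings_before_tmax := (start_times.map (fun t => PySem.Int.floordiv (time_max - t) X + 1)).sum
  if rings_before_tmax > K then
    pvLoopA X K.toNat 0 start_times
  else
    let rings_in_period : Int := start_times.length
    let num_periods := PySem.Int.floordiv (K - rings_before_tmax) rings_in_period
    let rings_remain := K - rings_before_tmax - rings_in_period * num_periods
    let wake_time := time_max + X * num_periods
    let heap := start_times.map (fun t =>
      X * num_periods + t + X * PySem.Int.floordiv (time_max + X - t) X)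
    pvLoopA X rings_remain.toNat wake_time heap

-- ===== PORT B =====
def pvCount (X : Int) (start_times : List Int) (T : Int) : Int :=
  ((start_times.filter (fun t => T ≥ t)).map (fun t => PySem.Int.floordiv (T - t) X + 1)).sum

def pvBSearch (X : Int) (K : Int) (start_times : List Int) (lo hi : Int) : Int :=
  if h : lo < hi then
    let mid := PySem.Int.floordiv (lo + hi) 2
    if pvCount X start_times mid ≥ K then
      pvBSearch X K start_times lo mid
    else
      pvBSearch X K start_times (mid + 1) hi
  else lo
termination_by (hi - lo).toNat
decreasing_by
  · have h2 : PySem.Int.floordiv (lo + hi) 2 < hi :=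
      (PySem.Int.floordiv_lt_iff_lt_mul (by norm_num)).mpr (by omega)
    have h1 := PySem.Int.floordiv_two_mid_bounds (le_of_lt h)
    omega
  · have h1 := PySem.Int.floordiv_two_mid_bounds (le_of_lt h)
    omega

def compute_wake_time_alt (X : Int) (K : Int) (start_times : List Int) : Int :=
  let time_max := (PySem.List.max? start_times (fun y => y)).getD 0
  if K ≤ 0 then 0
  else
    let lo := (PySem.List.min? start_times (fun y => y)).getD 0
    pvBSearch X K start_times lo (time_max + X * K)

-- ===== PRECONDITION & SPEC =====
-- Pre_ excludes empty start_times, where A raises ValueError on max(), and X ≤ 0: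
-- for X = 0 A raises ZeroDivisionError, and for X < 0 the period fast-forward and
-- heap simulation of A return values that are artefacts of its implementation
-- (the simulated "next ring" moves backwards in time), which B does not match.
def Pre_compute_wake_time (X : Int) (K : Int) (start_times : List Int) : Prop :=
  1 ≤ X ∧ start_times ≠ []
instance (X : Int) (K : Int) (start_times : List Int) : Decidable (Pre_compute_wake_time X K start_times) := by
  unfold Pre_compute_wake_time; infer_instance

def pvWitness_compute_wake_time : Int × Int × List Int := (2, 3, [0, 1])

def Spec_compute_wake_time (X : Int) (K : Int) (start_times : List Int) (out : Int) : Prop := out = compute_wake_time_alt X K start_times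
instance (X : Int) (K : Int) (start_times : List Int) (out : Int) : Decidable (Spec_compute_wake_time X K start_times out) := by unfold Spec_compute_wake_time; infer_instance

-- ===== CLAIM (what is proved, stated in full; the proofs are below) =====
def Claim_equal_compute_wake_time : Prop := ∀ (X : Int) (K : Int) (start_times : List Int), Dom_compute_wake_time X K start_times → Pre_compute_wake_time X K start_times → Spec_compute_wake_time X K start_times (compute_wake_time X K start_times)

-- ===== LEMMAS AND PROOFS =====

-- pvG X T t : the number of rings of the alarm starting at t (period X) at times ≤ T.
def pvG (X T t : Int) : Int :=
  if t ≤ T then PySem.Int.floordiv (T - t) X + 1 else 0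

-- pvC X s T : the total number of rings at times ≤ T of the alarms in s.
def pvC (X : Int) (s : List Int) (T : Int) : Int := (s.map (pvG X T)).sum

-- pvP X K s v : v is the smallest time at which the ring count reaches K.
def pvP (X K : Int) (s : List Int) (v : Int) : Prop :=
  K ≤ pvC X s v ∧ ∀ T, T < v → pvC X s T < K

lemma pvG_nonneg (X T t : Int) (hX : 0 < X) : 0 ≤ pvG X T t := by
  unfold pvG; split
  · have := (PySem.Int.le_floordiv_iff_mul_le (a := T - t) (b := X) (q := 0) hX)
    omega
  · exact le_refl 0

lemma pvG_mono (X t : Int) {T T' : Int} (hX : 0 < X) (h : T ≤ T') :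
    pvG X T t ≤ pvG X T' t := by
  unfold pvG
  by_cases h1 : t ≤ T
  · rw [if_pos h1, if_pos (le_trans h1 h)]
    have h2 := PySem.Int.floordiv_mul_add_mod (T - t) X
    have h3 := PySem.Int.mod_nonneg (T - t) hX
    have h4 := (PySem.Int.le_floordiv_iff_mul_le
      (a := T' - t) (b := X) (q := PySem.Int.floordiv (T - t) X) hX)
    omega
  · rw [if_neg h1]
    exact pvG_nonneg X T' t hX

lemma pvG_zero (X T t : Int) (h : T < t) : pvG X T t = 0 := by
  unfold pvG; rw [if_neg (by omega)]

lemma pvG_self (X t : Int) (hX : 0 < X) : pvG X t t = 1 := by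
  unfold pvG
  rw [if_pos (le_refl t), sub_self, PySem.Int.floordiv_eq_ediv_of_pos hX, Int.zero_ediv]
  omega

@[simp] lemma pvC_nil (X T : Int) : pvC X [] T = 0 := rfl

@[simp] lemma pvC_cons (X T t : Int) (s : List Int) :
    pvC X (t :: s) T = pvG X T t + pvC X s T := by simp [pvC]

@[simp] lemma pvC_append (X T : Int) (s s' : List Int) :
    pvC X (s ++ s') T = pvC X s T + pvC X s' T := by simp [pvC]

lemma pvC_nonneg (X T : Int) (s : List Int) (hX : 0 < X) : 0 ≤ pvC X s T := by
  induction s with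
  | nil => simp
  | cons t s ih => have := pvG_nonneg X T t hX; simp; omega

lemma pvC_mono (X : Int) (s : List Int) {T T' : Int} (hX : 0 < X) (h : T ≤ T') :
    pvC X s T ≤ pvC X s T' := by
  induction s with
  | nil => simp
  | cons t s ih => have := pvG_mono X t hX h; simp; omega

lemma pvC_zero (X T : Int) (s : List Int) (h : ∀ a ∈ s, T < a) : pvC X s T = 0 := by
  induction s with
  | nil => simp
  | cons t s ih =>
      have h1 := pvG_zero X T t (h t (by simp))
      have h2 := ih (fun a ha => h a (by simp [ha]))
      simp [h1, h2]

lemma pvC_perm (X T : Int) {s s' : List Int} (h : s.Perm s') : pvC X s T = pvC X s' T :=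
  List.Perm.sum_eq (h.map _)

lemma pvC_erase (X T m : Int) (s : List Int) (hm : m ∈ s) :
    pvC X s T = pvG X T m + pvC X (s.erase m) T := by
  have := pvC_perm X T (List.perm_cons_erase hm)
  simpa using this

lemma pvFd_add_self (X a : Int) (hX : 0 < X) :
    PySem.Int.floordiv (a + X) X = PySem.Int.floordiv a X + 1 := by
  rw [PySem.Int.floordiv_eq_ediv_of_pos hX, PySem.Int.floordiv_eq_ediv_of_pos hX]
  have := Int.add_mul_ediv_right a 1 (ne_of_gt hX)
  simpa using this

lemma pvG_step (X T t : Int) (hX : 0 < X) :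
    pvG X T t = pvG X T (t + X) + (if t ≤ T then 1 else 0) := by
  unfold pvG
  by_cases h1 : t ≤ T
  · by_cases h2 : t + X ≤ T
    · rw [if_pos h1, if_pos h2, if_pos h1]
      have : T - t = (T - (t + X)) + X := by ring
      rw [this, pvFd_add_self X (T - (t + X)) hX]
    · rw [if_pos h1, if_neg h2, if_pos h1]
      have : PySem.Int.floordiv (T - t) X = 0 :=
        (PySem.Int.floordiv_eq_iff_of_pos hX).mpr ⟨by omega, by omega⟩
      omega
  · rw [if_neg h1, if_neg (by omega), if_neg h1]
    omega

lemma pvG_shift (X : Int) (hX : 0 < X) (n : Nat) (t T : Int)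
    (h : ∀ j : Nat, j < n → t + X * (j : Int) ≤ T) :
    pvG X T t = pvG X T (t + X * (n : Int)) + (n : Int) := by
  induction n generalizing t with
  | zero => simp
  | succ n ih =>
      have ht : t ≤ T := by have := h 0 (by omega); simpa using this
      have hstep := pvG_step X T t hX
      rw [if_pos ht] at hstep
      have hrec := ih (t + X) (fun j hj => by
        have := h (j + 1) (by omega)
        push_cast at this ⊢
        linarith)
      have harg : t + X + X * (n : Int) = t + X * ((n : Nat) + 1 : Int) := by ring
      rw [harg] at hrec
      push_cast at hstep hrec ⊢
      omega

lemma pvP_unique (X K : Int) (s : List Int) {v v' : Int}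
    (h1 : pvP X K s v) (h2 : pvP X K s v') : v = v' := by
  rcases lt_trichotomy v v' with h | h | h
  · have := h2.2 v h; have := h1.1; omega
  · exact h
  · have := h1.2 v' h; have := h2.1; omega

lemma pvLoopA_zero (X w : Int) (h : List Int) : pvLoopA X 0 w h = w := rfl

lemma pvLoopA_succ (X : Int) (n : Nat) (w : Int) (h : List Int) :
    pvLoopA X (n + 1) w h =
      pvLoopA X n ((PySem.List.min? h (fun y => y)).getD 0)
        (h.erase ((PySem.List.min? h (fun y => y)).getD 0) ++
          [(PySem.List.min? h (fun y => y)).getD 0 + X]) := rfl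

lemma pvLoopA_correct (X : Int) (hX : 0 < X) (k : Nat) :
    ∀ (w : Int) (h : List Int), h ≠ [] →
      pvP X ((k : Int) + 1) h (pvLoopA X (k + 1) w h) := by
  induction k with
  | zero =>
      intro w h hne
      cases hm : PySem.List.min? h (fun y => y) with
      | none => exact absurd ((PySem.List.min?_eq_none_iff h _).mp hm) hne
      | some m =>
          rw [pvLoopA_succ, hm]
          simp only [Option.getD_some, pvLoopA_zero]
          constructor
          · have h1 := pvC_erase X m m h (PySem.List.min?_mem hm)
            have h2 := pvC_nonneg X m (h.erase m) hX
            have h3 := pvG_self X m hX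
            push_cast
            omega
          · intro T hT
            have : pvC X h T = 0 :=
              pvC_zero X T h (fun a ha =>
                lt_of_lt_of_le hT (PySem.List.min?_isMin hm a ha))
            push_cast
            omega
  | succ k ih =>
      intro w h hne
      cases hm : PySem.List.min? h (fun y => y) with
      | none => exact absurd ((PySem.List.min?_eq_none_iff h _).mp hm) hne
      | some m =>
          rw [pvLoopA_succ, hm]
          simp only [Option.getD_some]
          have hmem := PySem.List.min?_mem hm
          have hmin := PySem.List.min?_isMin hm
          set h' := h.erase m ++ [m + X] with hh'
          have hne' : h' ≠ [] := by simp [hh']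
          have hrel : ∀ T, pvC X h T = pvC X h' T + (if m ≤ T then 1 else 0) := by
            intro T
            have h1 := pvC_erase X T m h hmem
            have h2 : pvC X h' T = pvC X (h.erase m) T + pvG X T (m + X) := by
              simp [hh', pvC]
            have h3 := pvG_step X T m hX
            omega
          have hge : ∀ a ∈ h', m ≤ a := by
            intro a ha
            rw [hh', List.mem_append] at ha
            rcases ha with ha | ha
            · exact hmin a (List.mem_of_mem_erase ha)
            · simp at ha; omega
          obtain ⟨ihA, ihB⟩ := ih m h' hne'
          set v := pvLoopA X (k + 1) m h' with hv
          have hmv : m ≤ v := by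
            by_contra hc
            have : pvC X h' v = 0 :=
              pvC_zero X v h' (fun a ha => lt_of_lt_of_le (by omega) (hge a ha))
            omega
          constructor
          · have hr := hrel v
            rw [if_pos hmv] at hr
            push_cast at ihA ⊢
            omega
          · intro T hT
            have hr := hrel T
            have hb : pvC X h' T < (k : Int) + 1 := by
              by_cases hTm : m ≤ T
              · exact ihB T hT
              · have : pvC X h' T = 0 :=
                  pvC_zero X T h' (fun a ha => lt_of_lt_of_le (by omega) (hge a ha))
                omega
            split at hr <;> (push_cast at hb ⊢; omega)

lemma pvCount_eq_pvC (X T : Int) (s : List Int) : pvCount X s T = pvC X s T := by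
  induction s with
  | nil => rfl
  | cons t s ih =>
      unfold pvCount at ih ⊢
      rw [List.filter_cons]
      split
      · next hdec =>
          have h : t ≤ T := by simpa using hdec
          simp only [List.map_cons, List.sum_cons, pvC_cons]
          rw [ih]
          unfold pvG
          rw [if_pos h]
      · next hdec =>
          have h : ¬ t ≤ T := by simpa using hdec
          rw [ih, pvC_cons, pvG_zero X T t (by omega)]
          omega

lemma pvBSearch_correct (X K : Int) (s : List Int) (hX : 0 < X) :
    ∀ (n : Nat) (lo hi : Int), (hi - lo).toNat = n → lo ≤ hi →
      (∀ T, T < lo → pvC X s T < K) → K ≤ pvC X s hi →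
      pvP X K s (pvBSearch X K s lo hi) := by
  intro n
  induction n using Nat.strong_induction_on with
  | _ n ih =>
      intro lo hi hn hlohi hlow hhigh
      rw [pvBSearch]
      by_cases h : lo < hi
      · rw [dif_pos h]
        have hmid := PySem.Int.floordiv_two_mid_bounds (le_of_lt h)
        have hmidlt : PySem.Int.floordiv (lo + hi) 2 < hi :=
          (PySem.Int.floordiv_lt_iff_lt_mul (by norm_num)).mpr (by omega)
        set mid := PySem.Int.floordiv (lo + hi) 2 with hm
        by_cases hc : pvCount X s mid ≥ K
        · rw [if_pos hc]
          rw [pvCount_eq_pvC] at hc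
          exact ih (mid - lo).toNat (by omega) lo mid rfl (by omega) hlow hc
        · rw [if_neg hc]
          rw [pvCount_eq_pvC] at hc
          refine ih (hi - (mid + 1)).toNat (by omega) (mid + 1) hi rfl (by omega) ?_ hhigh
          intro T hT
          calc pvC X s T ≤ pvC X s mid := pvC_mono X s hX (by omega)
          _ < K := by omega
      · rw [dif_neg h]
        have : lo = hi := by omega
        subst this
        exact ⟨hhigh, hlow⟩

lemma pvRbt_eq (X tm : Int) (s : List Int) (htm : ∀ t ∈ s, t ≤ tm) :
    (s.map (fun t => PySem.Int.floordiv (tm - t) X + 1)).sum = pvC X s tm := by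
  induction s with
  | nil => rfl
  | cons t s ih =>
      have h1 : pvG X tm t = PySem.Int.floordiv (tm - t) X + 1 := by
        unfold pvG; rw [if_pos (htm t (by simp))]
      have h2 := ih (fun a ha => htm a (by simp [ha]))
      simp [h1, h2]

lemma pvLen_le_pvC (X tm : Int) (s : List Int) (hX : 0 < X) (htm : ∀ t ∈ s, t ≤ tm) :
    (s.length : Int) ≤ pvC X s tm := by
  induction s with
  | nil => simp
  | cons t s ih =>
      have h1 : 1 ≤ pvG X tm t := by
        unfold pvG
        rw [if_pos (htm t (by simp))]
        have h3 := (PySem.Int.le_floordiv_iff_mul_le (a := tm - t) (b := X) (q := 0) hX)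
        have h4 := htm t (by simp)
        omega
      have h2 := ih (fun a ha => htm a (by simp [ha]))
      simp only [pvC_cons, List.length_cons]
      push_cast
      omega

lemma pvAlt_P (X K : Int) (s : List Int) (hX : 0 < X) (hs : s ≠ []) (hK : 1 ≤ K) :
    pvP X K s (compute_wake_time_alt X K s) := by
  cases hmx : PySem.List.max? s (fun y => y) with
  | none => exact absurd ((PySem.List.max?_eq_none_iff s _).mp hmx) hs
  | some tm =>
      cases hmn : PySem.List.min? s (fun y => y) with
      | none => exact absurd ((PySem.List.min?_eq_none_iff s _).mp hmn) hs
      | some mn =>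
          have hmax := PySem.List.max?_isMax hmx
          have hmnmem := PySem.List.min?_mem hmn
          have htm_mem := PySem.List.max?_mem hmx
          have hXK : 0 < X * K := mul_pos hX (by omega)
          simp only [compute_wake_time_alt, hmx, hmn, Option.getD_some]
          rw [if_neg (show ¬ K ≤ 0 by omega)]
          apply pvBSearch_correct X K s hX ((tm + X * K) - mn).toNat mn (tm + X * K) rfl
          · have := hmax mn hmnmem
            omega
          · intro T hT
            have : pvC X s T = 0 :=
              pvC_zero X T s (fun a ha =>
                lt_of_lt_of_le hT (PySem.List.min?_isMin hmn a ha))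
            omega
          · have h1 := pvC_erase X (tm + X * K) tm s htm_mem
            have h2 := pvC_nonneg X (tm + X * K) (s.erase tm) hX
            have h3 : pvG X (tm + X * K) tm = K + 1 := by
              unfold pvG
              rw [if_pos (by omega), show tm + X * K - tm = X * K by ring,
                PySem.Int.floordiv_eq_ediv_of_pos hX,
                Int.mul_ediv_cancel_left K (ne_of_gt hX)]
            omega

lemma pvA_P (X K : Int) (s : List Int) (hX : 0 < X) (hs : s ≠ []) (hK : 1 ≤ K) :
    pvP X K s (compute_wake_time X K s) := by
  cases hmx : PySem.List.max? s (fun y => y) with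
  | none => exact absurd ((PySem.List.max?_eq_none_iff s _).mp hmx) hs
  | some tm =>
      have hmax := PySem.List.max?_isMax hmx
      have htm_mem := PySem.List.max?_mem hmx
      simp only [compute_wake_time, hmx, Option.getD_some]
      rw [pvRbt_eq X tm s hmax]
      by_cases hb : pvC X s tm > K
      · rw [if_pos hb]
        obtain ⟨k, hk⟩ : ∃ k : Nat, K = (k : Int) + 1 := ⟨(K - 1).toNat, by omega⟩
        have hkt : K.toNat = k + 1 := by omega
        rw [hkt, hk]
        exact pvLoopA_correct X hX k 0 s hs
      · rw [if_neg hb]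
        push_neg at hb
        set len : Int := (s.length : Int) with hlen_def
        have hlen : 1 ≤ len := by
          have : s.length ≠ 0 := by simpa using hs
          omega
        set rbt := pvC X s tm with hrbt_def
        have hrbt_len : len ≤ rbt := by
          rw [hrbt_def, hlen_def]
          exact pvLen_le_pvC X tm s hX hmax
        set np := PySem.Int.floordiv (K - rbt) len with hnp_def
        set r := K - rbt - len * np with hr_def
        have hfd := PySem.Int.floordiv_mul_add_mod (K - rbt) len
        have hm0 := PySem.Int.mod_nonneg (K - rbt) (show (0:Int) < len by omega)
        have hm1 := PySem.Int.mod_lt (K - rbt) (show (0:Int) < len by omega)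
        have hcomm : len * np = np * len := mul_comm len np
        have hnp_fd : np * len + PySem.Int.mod (K - rbt) len = K - rbt := by
          rw [hnp_def]; exact hfd
        have hr0 : 0 ≤ r := by omega
        have hr1 : r < len := by omega
        have hnp0 : 0 ≤ np := by
          rw [hnp_def]
          exact (PySem.Int.le_floordiv_iff_mul_le (show (0:Int) < len by omega)).mpr
            (by omega)
        have hXnp : 0 ≤ X * np := mul_nonneg (by omega) hnp0
        set w := tm + X * np with hw_def
        set f := fun t => X * np + t + X * PySem.Int.floordiv (tm + X - t) X with hf_def
        have hft : ∀ t ∈ s, f t = t + X * (np + PySem.Int.floordiv (tm - t) X + 1) := by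
          intro t ht
          rw [hf_def]
          simp only []
          rw [show tm + X - t = (tm - t) + X by ring, pvFd_add_self X (tm - t) hX]
          ring
        have hq_bounds : ∀ t ∈ s,
            PySem.Int.floordiv (tm - t) X * X ≤ tm - t ∧
            tm - t < PySem.Int.floordiv (tm - t) X * X + X := by
          intro t ht
          have h5 := PySem.Int.floordiv_mul_add_mod (tm - t) X
          have h6 := PySem.Int.mod_nonneg (tm - t) hX
          have h7 := PySem.Int.mod_lt (tm - t) hX
          omega
        have hq0 : ∀ t ∈ s, 0 ≤ PySem.Int.floordiv (tm - t) X := by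
          intro t ht
          exact (PySem.Int.le_floordiv_iff_mul_le hX).mpr (by have := hmax t ht; omega)
        have hheap_gt : ∀ a ∈ s.map f, w < a := by
          intro a ha
          rw [List.mem_map] at ha
          obtain ⟨t, ht, rfl⟩ := ha
          rw [hft t ht]
          have h1 := (hq_bounds t ht).2
          have h2 := hq0 t ht
          have h3 : X * (np + PySem.Int.floordiv (tm - t) X + 1)
              = X * np + PySem.Int.floordiv (tm - t) X * X + X := by ring
          omega
        have hheap_cnt : ∀ T, w ≤ T → ∀ (s' : List Int), (∀ t ∈ s', t ∈ s) →
            pvC X (s'.map f) T = pvC X s' T - ((s'.length : Int) * np + pvC X s' tm) := by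
          intro T hT s' hsub
          induction s' with
          | nil => simp
          | cons t s' ih =>
              have hts : t ∈ s := hsub t (by simp)
              have ih' := ih (fun a ha => hsub a (by simp [ha]))
              have hq0' := hq0 t hts
              have hqb := hq_bounds t hts
              set q := PySem.Int.floordiv (tm - t) X with hq_def
              set n : Nat := (np + q + 1).toNat with hn_def
              have hn_cast : (n : Int) = np + q + 1 := by omega
              have hshift := pvG_shift X hX n t T (by
                intro j hj
                have hj' : (j : Int) ≤ np + q := by omega
                have h8 : X * (j : Int) ≤ X * (np + q) :=
                  mul_le_mul_of_nonneg_left hj' (by omega)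
                have hx1 : X * (np + q) = q * X + X * np := by ring
                omega)
              rw [hn_cast] at hshift
              have hgt : pvG X tm t = q + 1 := by
                unfold pvG
                rw [if_pos (hmax t hts), hq_def]
              have hfval : f t = t + X * (np + q + 1) := by rw [hft t hts, hq_def]
              simp only [List.map_cons, pvC_cons, List.length_cons, hfval]
              have hdist : (((s'.length : Int)) + 1) * np = (s'.length : Int) * np + np := by
                ring
              push_cast at ih' hdist ⊢
              omega
        have hcnt : ∀ T, w ≤ T →
            pvC X (s.map f) T = pvC X s T - (len * np + rbt) := by
          intro T hT
          have h9 := hheap_cnt T hT s (fun a ha => ha)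
          rw [← hlen_def, ← hrbt_def] at h9
          exact h9
        have hCw : pvC X s w = rbt + len * np := by
          have h1 := hcnt w (le_refl w)
          have h3 : pvC X (s.map f) w = 0 := pvC_zero X w (s.map f) hheap_gt
          omega
        have hlnp0 : 0 ≤ len * np := mul_nonneg (by omega) hnp0
        have hCw_pred : pvC X s (w - 1) < rbt + len * np := by
          have hsplit := pvC_erase X (w - 1) tm s htm_mem
          have hsplit' := pvC_erase X w tm s htm_mem
          have hmono := pvC_mono X (s.erase tm) hX (show w - 1 ≤ w by omega)
          have hgw : pvG X w tm = np + 1 := by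
            unfold pvG
            rw [if_pos (by omega), show w - tm = X * np by omega,
              PySem.Int.floordiv_eq_ediv_of_pos hX,
              Int.mul_ediv_cancel_left np (ne_of_gt hX)]
          have hgw1 : pvG X (w - 1) tm ≤ np := by
            unfold pvG
            split
            · by_contra hc
              push_neg at hc
              have h5 := (PySem.Int.le_floordiv_iff_mul_le
                (a := w - 1 - tm) (b := X) (q := np) hX).mp (by omega)
              have h6 : np * X = X * np := mul_comm np X
              omega
            · omega
          have h10 : pvG X w tm + pvC X (s.erase tm) w = rbt + len * np := by
            omega
          linarith [hsplit, hmono, hgw, hgw1, h10, hlnp0]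
        by_cases hr : r = 0
        · have h0 : r.toNat = 0 := by omega
          rw [h0, pvLoopA_zero]
          constructor
          · have hKeq : K = rbt + len * np := by omega
            omega
          · intro T hT
            have := pvC_mono X s hX (show T ≤ w - 1 by omega)
            omega
        · obtain ⟨k, hk⟩ : ∃ k : Nat, r = (k : Int) + 1 := ⟨(r - 1).toNat, by omega⟩
          have hkt : r.toNat = k + 1 := by omega
          rw [hkt]
          have hmapne : s.map f ≠ [] := by simpa using hs
          obtain ⟨ihA, ihB⟩ := pvLoopA_correct X hX k w (s.map f) hmapne
          set v := pvLoopA X (k + 1) w (s.map f) with hv_def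
          have hwv : w < v := by
            by_contra hc
            push_neg at hc
            have : pvC X (s.map f) v = 0 :=
              pvC_zero X v (s.map f) (fun a ha => lt_of_le_of_lt hc (hheap_gt a ha))
            omega
          constructor
          · have h1 := hcnt v (by omega)
            omega
          · intro T hT
            by_cases hTw : T ≤ w
            · have := pvC_mono X s hX hTw
              omega
            · have h1 := hcnt T (by omega)
              have h2 := ihB T hT
              omega

-- A's first branch with K ≤ 0 (always taken then) returns 0, matching B.
theorem compute_wake_time_spec : Claim_equal_compute_wake_time := by
  intro X K s _ hPre
  obtain ⟨hX, hs⟩ := hPre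
  unfold Spec_compute_wake_time
  by_cases hK : K ≤ 0
  · cases hmx : PySem.List.max? s (fun y => y) with
    | none => exact absurd ((PySem.List.max?_eq_none_iff s _).mp hmx) hs
    | some tm =>
        have hmax := PySem.List.max?_isMax hmx
        simp only [compute_wake_time, compute_wake_time_alt, hmx, Option.getD_some]
        rw [if_pos hK, pvRbt_eq X tm s hmax]
        have hlen : 1 ≤ (s.length : Int) := by
          have : s.length ≠ 0 := by simpa using hs
          omega
        have hlc := pvLen_le_pvC X tm s (by omega) hmax
        rw [if_pos (show pvC X s tm > K by omega),
          show K.toNat = 0 by omega, pvLoopA_zero]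
  · exact pvP_unique X K s
      (pvA_P X K s (by omega) hs (by omega))
      (pvAlt_P X K s (by omega) hs (by omega))
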